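-- pv_equiv track=rewrite | github.com/submission-paper-code/submit | python/tvm/meta_schedule/search_strategy/llm_guidance.py | _infer_next_model_from_text
-- ===== SOURCE A (Python) =====
-- from typing import List, Optional, Dict, Tuple
--
-- def _infer_next_model_from_text(text: str, valid_models: List[str]) -> str:
--     if not text:
--         return ""
--     low = text.lower()
--
--     best = ""
--     best_pos = -1
--
--     for m in valid_models:
--         pos = low.rfind(m.lower())
--         if pos > best_pos:
--             best_pos = pos
--             best = m
--
--     for m in valid_models:
--         if "/" in m:
--             tail = m.split("/", 1)[1]
--             pos = low.rfind(tail.lower())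
--             if pos > best_pos:
--                 best_pos = pos
--                 best = m
--
--     return best
-- ===== SOURCE B (Python) =====
-- from typing import List
--
-- def _infer_next_model_from_text(text: str, valid_models: List[str]) -> str:
--     # Single descending scan over positions: instead of one rfind pass per
--     # pattern, collect all candidate (pattern, model) pairs once and walk the
--     # text right-to-left, returning at the first (i.e. rightmost) match.
--     if not text:
--         return ""
--     low = text.lower()
--     cands = [(m.lower(), m) for m in valid_models]
--     cands += [(m.split("/", 1)[1].lower(), m) for m in valid_models if "/" in m]
--     for pos in range(len(low), -1, -1):
--         for p, m in cands:
--             if low.startswith(p, pos):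
--                 return m
--     return ""
-- ===== Notes on version B (the rewrite author's own statement) =====
-- stated objective: faster
-- what changed: Instead of one full rfind pass over the text per pattern with a running best, B builds the (pattern, model) candidate list once and walks the text right-to-left a single time, returning at the first (hence rightmost, earliest-listed) match, so it never scans left of the answer.
import Mathlib
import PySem

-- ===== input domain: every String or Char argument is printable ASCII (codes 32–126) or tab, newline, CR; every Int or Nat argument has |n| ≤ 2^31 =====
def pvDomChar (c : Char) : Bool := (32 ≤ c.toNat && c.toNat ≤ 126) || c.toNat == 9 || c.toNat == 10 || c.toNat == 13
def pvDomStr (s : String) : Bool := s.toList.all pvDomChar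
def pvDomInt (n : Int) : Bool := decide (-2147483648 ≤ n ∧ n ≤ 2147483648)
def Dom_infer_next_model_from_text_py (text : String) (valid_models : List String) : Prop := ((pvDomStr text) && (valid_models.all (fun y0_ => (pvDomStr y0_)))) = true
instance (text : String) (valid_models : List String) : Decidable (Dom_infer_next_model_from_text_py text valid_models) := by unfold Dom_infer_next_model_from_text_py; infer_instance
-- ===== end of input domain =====

-- B replaces the per-pattern rfind passes by one right-to-left scan of the text over a
-- candidate list built once (alternative decomposition; return value only, no mutation).

-- ===== PORT A =====
-- m.split("/", 1)[1]: the branch guarantees "/" ∈ m, so index 1 exists; getD defaults are never taken.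
def pvTail (m : String) : String :=
  PySem.List.pyGetD ((PySem.Str.splitMax? m "/" 1).getD []) 1 ""

def infer_next_model_from_text_py (text : String) (valid_models : List String) : String :=
  if text = "" then ""
  else
    let low := PySem.Str.lower text
    let s1 := valid_models.foldl (fun (st : String × Int) m =>
        let pos := PySem.Str.rfind low (PySem.Str.lower m)
        if pos > st.2 then (m, pos) else st) ("", -1)
    let s2 := valid_models.foldl (fun (st : String × Int) m =>
        if PySem.Str.isIn "/" m then
          let pos := PySem.Str.rfind low (PySem.Str.lower (pvTail m))
          if pos > st.2 then (m, pos) else st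
        else st) s1
    s2.1

-- ===== PORT B =====
-- low.startswith(p, pos) for 0 ≤ pos ≤ len(low) is exactly: p is a prefix of low[pos:].
def altFindAt (lowL : List Char) (cands : List (List Char × String)) (pos : Nat) : Option String :=
  match cands with
  | [] => none
  | (p, m) :: rest => if p.isPrefixOf (lowL.drop pos) then some m else altFindAt lowL rest pos

-- for pos in range(len(low), -1, -1): descending scan, first match returns.
def altScan (lowL : List Char) (cands : List (List Char × String)) (pos : Nat) : String :=
  match altFindAt lowL cands pos with
  | some m => m
  | none =>
    match pos with
    | 0 => ""
    | j + 1 => altScan lowL cands j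

def infer_next_model_from_text_py_alt (text : String) (valid_models : List String) : String :=
  if text = "" then ""
  else
    let lowL := (PySem.Str.lower text).toList
    let cands := valid_models.map (fun m => ((PySem.Str.lower m).toList, m))
      ++ (valid_models.filter (fun m => PySem.Str.isIn "/" m)).map
          (fun m => ((PySem.Str.lower (pvTail m)).toList, m))
    altScan lowL cands lowL.length

-- ===== PRECONDITION & SPEC =====
def Spec_infer_next_model_from_text_py (text : String) (valid_models : List String) (out : String) : Prop := out = infer_next_model_from_text_py_alt text valid_models
instance (text : String) (valid_models : List String) (out : String) : Decidable (Spec_infer_next_model_from_text_py text valid_models out) := by unfold Spec_infer_next_model_from_text_py; infer_instance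

-- ===== CLAIM (what is proved, stated in full; the proofs are below) =====
def Claim_equal_infer_next_model_from_text_py : Prop := ∀ (text : String) (valid_models : List String), Dom_infer_next_model_from_text_py text valid_models → Spec_infer_next_model_from_text_py text valid_models (infer_next_model_from_text_py text valid_models)

-- ===== LEMMAS AND PROOFS =====

-- the fold step both sides reduce to, parametrised by the position cap
def pvUpd (lowL : List Char) (pos : Nat) (st : String × Int) (c : List Char × String) : String × Int :=
  if PySem.Chars.rfind.go lowL c.1 pos > st.2 then (c.2, PySem.Chars.rfind.go lowL c.1 pos) else st

theorem pvFoldlCongr {α β : Type} (l : List α) (f g : β → α → β) :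
    ∀ (b : β), (∀ x ∈ l, ∀ s, f s x = g s x) → l.foldl f b = l.foldl g b := by
  induction l with
  | nil => intro b _; rfl
  | cons a l ih =>
    intro b h
    simp only [List.foldl_cons, h a (by simp) b]
    exact ih _ (fun x hx s => h x (by simp [hx]) s)

theorem pvGo_le (s sub : List Char) : ∀ j : Nat, PySem.Chars.rfind.go s sub j ≤ (j : Int) := by
  intro j
  induction j with
  | zero => simp only [PySem.Chars.rfind.go]; split <;> simp
  | succ j ih =>
    simp only [PySem.Chars.rfind.go]
    split
    · simp
    · omega

theorem pvGo_succ_not (s sub : List Char) (j : Nat) (h : ¬ sub <+: s.drop (j + 1)) :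
    PySem.Chars.rfind.go s sub (j + 1) = PySem.Chars.rfind.go s sub j := by
  simp only [PySem.Chars.rfind.go]
  rw [if_neg (by simpa [List.isPrefixOf_iff_prefix] using h)]

theorem pvGo_zero_not (s sub : List Char) (h : ¬ sub <+: s) :
    PySem.Chars.rfind.go s sub 0 = -1 := by
  simp only [PySem.Chars.rfind.go]
  rw [if_neg (by simpa [List.isPrefixOf_iff_prefix] using h)]

theorem pvGo_of_prefix (s sub : List Char) (j : Nat) (h : sub <+: s.drop j) :
    PySem.Chars.rfind.go s sub j = j := by
  cases j with
  | zero =>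
    simp only [PySem.Chars.rfind.go]
    rw [if_pos (by simpa [List.isPrefixOf_iff_prefix] using h)]
    rfl
  | succ j =>
    simp only [PySem.Chars.rfind.go]
    rw [if_pos (by simpa [List.isPrefixOf_iff_prefix] using h)]

theorem pvGo_lt_of_not_prefix (s sub : List Char) (j : Nat) (h : ¬ sub <+: s.drop j) :
    PySem.Chars.rfind.go s sub j < (j : Int) := by
  cases j with
  | zero => rw [List.drop_zero] at h; rw [pvGo_zero_not s sub h]; omega
  | succ j =>
    rw [pvGo_succ_not s sub j h]
    have := pvGo_le s sub j
    omega

theorem pvFold_no_update (lowL : List Char) (pos : Nat) (b : String × Int)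
    (cs : List (List Char × String)) (h : ∀ c ∈ cs, PySem.Chars.rfind.go lowL c.1 pos ≤ b.2) :
    cs.foldl (pvUpd lowL pos) b = b := by
  induction cs with
  | nil => rfl
  | cons c cs ih =>
    have hc := h c (by simp)
    simp only [List.foldl_cons, pvUpd, if_neg (by omega : ¬ PySem.Chars.rfind.go lowL c.1 pos > b.2)]
    exact ih (fun c' hc' => h c' (by simp [hc']))

theorem pvFold_first (lowL : List Char) (pos : Nat) :
    ∀ (cs₁ : List (List Char × String)) (c : List Char × String) (cs₂ : List (List Char × String))
      (b : String × Int), b.2 < (pos : Int) →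
      (∀ c' ∈ cs₁, PySem.Chars.rfind.go lowL c'.1 pos < (pos : Int)) →
      PySem.Chars.rfind.go lowL c.1 pos = (pos : Int) →
      (∀ c' ∈ cs₂, PySem.Chars.rfind.go lowL c'.1 pos ≤ (pos : Int)) →
      ((cs₁ ++ c :: cs₂).foldl (pvUpd lowL pos) b).1 = c.2 := by
  intro cs₁
  induction cs₁ with
  | nil =>
    intro c cs₂ b hb _ hc h₂
    simp only [List.nil_append, List.foldl_cons]
    rw [show pvUpd lowL pos b c = (c.2, PySem.Chars.rfind.go lowL c.1 pos) from
      if_pos (by omega)]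
    rw [pvFold_no_update lowL pos _ cs₂ (by rw [hc]; simpa using h₂)]
  | cons a cs₁ ih =>
    intro c cs₂ b hb h₁ hc h₂
    simp only [List.cons_append, List.foldl_cons]
    have ha := h₁ a (by simp)
    have hstep : (pvUpd lowL pos b a).2 < (pos : Int) := by
      simp only [pvUpd]; split
      · exact ha
      · exact hb
    exact ih c cs₂ _ hstep (fun c' hc' => h₁ c' (by simp [hc'])) hc h₂

theorem pvFindAt_none (lowL : List Char) (pos : Nat) :
    ∀ cs, altFindAt lowL cs pos = none → ∀ c ∈ cs, ¬ c.1 <+: lowL.drop pos := by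
  intro cs
  induction cs with
  | nil => intro _ c hc; simp at hc
  | cons a cs ih =>
    intro h c hc
    obtain ⟨p, m⟩ := a
    by_cases hpf : p.isPrefixOf (lowL.drop pos)
    · simp [altFindAt, hpf] at h
    · simp only [altFindAt, hpf, Bool.false_eq_true, ite_false] at h
      rcases List.mem_cons.mp hc with rfl | hc'
      · simpa [List.isPrefixOf_iff_prefix] using hpf
      · exact ih h c hc'

theorem pvFindAt_some (lowL : List Char) (pos : Nat) :
    ∀ cs m, altFindAt lowL cs pos = some m →
      ∃ cs₁ p cs₂, cs = cs₁ ++ (p, m) :: cs₂ ∧ p <+: lowL.drop pos ∧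
        ∀ c ∈ cs₁, ¬ c.1 <+: lowL.drop pos := by
  intro cs
  induction cs with
  | nil => intro m h; simp [altFindAt] at h
  | cons a cs ih =>
    intro m h
    obtain ⟨p, m'⟩ := a
    by_cases hpf : p.isPrefixOf (lowL.drop pos)
    · have hm : m' = m := by simpa [altFindAt, hpf] using h
      subst hm
      exact ⟨[], p, cs, by simp, by simpa [List.isPrefixOf_iff_prefix] using hpf, by simp⟩
    · simp only [altFindAt, hpf, Bool.false_eq_true, ite_false] at h
      obtain ⟨cs₁, q, cs₂, rfl, hq, h₁⟩ := ih m h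
      refine ⟨(p, m') :: cs₁, q, cs₂, by simp, hq, ?_⟩
      intro c hc
      rcases List.mem_cons.mp hc with rfl | hc'
      · simpa [List.isPrefixOf_iff_prefix] using hpf
      · exact h₁ c hc'

theorem pvScan_eq_fold (lowL : List Char) (cands : List (List Char × String)) :
    ∀ pos : Nat, altScan lowL cands pos = (cands.foldl (pvUpd lowL pos) ("", -1)).1 := by
  intro pos
  induction pos with
  | zero =>
    cases h : altFindAt lowL cands 0 with
    | none =>
      have hall := pvFindAt_none lowL 0 cands h
      rw [altScan, h]
      rw [pvFold_no_update lowL 0 _ cands (fun c hc => by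
        rw [pvGo_zero_not lowL c.1 (by simpa using hall c hc)])]
    | some m =>
      obtain ⟨cs₁, p, cs₂, rfl, hp, h₁⟩ := pvFindAt_some lowL 0 _ m h
      rw [altScan, h]
      exact (pvFold_first lowL 0 cs₁ (p, m) cs₂ ("", -1) (by norm_num)
        (fun c hc => pvGo_lt_of_not_prefix lowL c.1 0 (h₁ c hc))
        (pvGo_of_prefix lowL p 0 hp)
        (fun c _ => pvGo_le lowL c.1 0)).symm
  | succ j ih =>
    cases h : altFindAt lowL cands (j + 1) with
    | none =>
      have hall := pvFindAt_none lowL (j + 1) cands h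
      rw [altScan, h, ih,
        pvFoldlCongr cands (pvUpd lowL (j + 1)) (pvUpd lowL j) ("", -1)
          (fun c hc s => by simp only [pvUpd, pvGo_succ_not lowL c.1 j (hall c hc)])]
    | some m =>
      obtain ⟨cs₁, p, cs₂, rfl, hp, h₁⟩ := pvFindAt_some lowL (j + 1) _ m h
      rw [altScan, h]
      exact (pvFold_first lowL (j + 1) cs₁ (p, m) cs₂ ("", -1)
        (show (-1 : Int) < ((j + 1 : Nat) : Int) by omega)
        (fun c hc => pvGo_lt_of_not_prefix lowL c.1 (j + 1) (h₁ c hc))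
        (pvGo_of_prefix lowL p (j + 1) hp)
        (fun c _ => pvGo_le lowL c.1 (j + 1))).symm

-- A's first loop, rewritten as a fold over the mapped candidate list
theorem pvLoop1 (low : String) (valid_models : List String) (b : String × Int) :
    valid_models.foldl (fun (st : String × Int) m =>
        let pos := PySem.Str.rfind low (PySem.Str.lower m)
        if pos > st.2 then (m, pos) else st) b
    = (valid_models.map (fun m => ((PySem.Str.lower m).toList, m))).foldl
        (pvUpd low.toList low.toList.length) b := by
  rw [List.foldl_map]
  exact pvFoldlCongr valid_models _ _ b (fun m _ s => by
    simp [pvUpd, PySem.Str.rfind_eq, PySem.Chars.rfind])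

-- A's second loop, rewritten as a fold over the filtered-and-mapped candidate list
theorem pvLoop2 (low : String) (valid_models : List String) :
    ∀ (b : String × Int),
    valid_models.foldl (fun (st : String × Int) m =>
        if PySem.Str.isIn "/" m then
          let pos := PySem.Str.rfind low (PySem.Str.lower (pvTail m))
          if pos > st.2 then (m, pos) else st
        else st) b
    = ((valid_models.filter (fun m => PySem.Str.isIn "/" m)).map
        (fun m => ((PySem.Str.lower (pvTail m)).toList, m))).foldl
        (pvUpd low.toList low.toList.length) b := by
  induction valid_models with
  | nil => intro b; rfl
  | cons m ms ih =>
    intro b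
    by_cases hm : PySem.Str.isIn "/" m = true
    · simp only [List.foldl_cons, if_pos hm, List.filter_cons_of_pos hm, List.map_cons]
      rw [ih, show (let pos := PySem.Str.rfind low (PySem.Str.lower (pvTail m));
            if pos > b.2 then (m, pos) else b)
          = pvUpd low.toList low.toList.length b ((PySem.Str.lower (pvTail m)).toList, m) from by
        simp [pvUpd, PySem.Chars.rfind]]
    · rw [List.foldl_cons, if_neg hm, List.filter_cons_of_neg (by simpa using hm)]
      exact ih b

-- ===== VERDICT (by name: the statement is the Claim_ definition above) =====
theorem infer_next_model_from_text_py_spec : Claim_equal_infer_next_model_from_text_py := by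
  intro text valid_models _
  unfold Spec_infer_next_model_from_text_py
  unfold infer_next_model_from_text_py infer_next_model_from_text_py_alt
  by_cases h : text = ""
  · simp only [h, ite_true]
  · simp only [h, ite_false]
    rw [pvLoop1, pvLoop2, ← List.foldl_append, pvScan_eq_fold]
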